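-- pv_equiv track=rewrite | github.com/dgoffredo/hackerrank | determining-dna-health/naive-precalc-hashes.py | min_and_max_scores
-- ===== SOURCE A (Python) =====
-- def substrings(sequence):
--     for i in range(len(sequence)):
--         for j in range(i + 1, len(sequence) + 1):
--             yield sequence[i:j]
--
-- def prepare_lookup_tables(scored_genes, strands):
--     table = {} # {(first, last): {gene: score}}
--
--     for first, last, _ in strands:
--         if (first, last) not in table:
--             table[first, last] = score_by_gene(scored_genes[first:last + 1])
--
--     return table
--
-- def score_by_gene(genes):
--     result = {} # {gene: score}
--
--     for gene, score in genes:
--         previous = result.get(gene, 0)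
--         result[gene] = previous + score
--
--     return result
--
-- def min_and_max_scores(scored_genes, strands):
--     min_score = None
--     max_score = None
--
--     tables = prepare_lookup_tables(scored_genes, strands)
--
--     for first, last, strand in strands:
--         table = tables[first, last]
--         score = sum(table.get(s, 0) for s in substrings(strand))
--
--         if min_score is None or score < min_score:
--             min_score = score
--         if max_score is None or score > max_score:
--             max_score = score
--
--     return min_score, max_score
-- ===== SOURCE B (Python) =====
-- def min_and_max_scores(scored_genes, strands):
--     # No per-(first,last) dict of gene scores: score each strand directly by
--     # counting overlapping occurrences of each in-range gene in the strand.
--     min_score = None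
--     max_score = None
--
--     for first, last, strand in strands:
--         length = len(strand)
--         score = 0
--         for gene, gene_score in scored_genes[first:last + 1]:
--             n = len(gene)
--             if n == 0:
--                 continue
--             score += gene_score * sum(
--                 1 for i in range(length - n + 1) if strand[i:i + n] == gene)
--
--         if min_score is None or score < min_score:
--             min_score = score
--         if max_score is None or score > max_score:
--             max_score = score
--
--     return min_score, max_score
-- ===== Notes on version B (the rewrite author's own statement) =====
-- stated objective: faster
-- what changed: B drops A's per-(first,last) gene-score dictionaries and its enumeration of all O(L^2) substrings of each strand, scoring each strand directly: for every gene in scored_genes[first:last+1] it counts that gene's overlapping occurrence positions in the strand and adds score times count.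
import Mathlib
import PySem

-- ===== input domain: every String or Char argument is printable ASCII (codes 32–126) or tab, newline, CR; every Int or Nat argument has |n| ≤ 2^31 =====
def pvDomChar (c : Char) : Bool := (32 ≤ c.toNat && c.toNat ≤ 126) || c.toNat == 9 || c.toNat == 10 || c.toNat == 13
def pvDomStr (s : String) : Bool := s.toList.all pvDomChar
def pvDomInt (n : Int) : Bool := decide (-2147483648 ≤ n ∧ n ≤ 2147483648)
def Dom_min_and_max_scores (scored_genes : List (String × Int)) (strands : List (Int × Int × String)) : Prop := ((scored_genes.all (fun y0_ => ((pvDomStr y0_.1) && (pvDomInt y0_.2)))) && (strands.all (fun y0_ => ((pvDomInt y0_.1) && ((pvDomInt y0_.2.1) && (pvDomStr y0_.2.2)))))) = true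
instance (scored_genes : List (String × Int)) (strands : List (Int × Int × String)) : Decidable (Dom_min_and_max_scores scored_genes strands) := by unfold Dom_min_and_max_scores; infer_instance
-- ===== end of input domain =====

-- B replaces A's per-(first,last) gene→score dictionaries and the enumeration of all
-- O(L^2) substrings of each strand by a direct scan: for each in-range gene, count its
-- overlapping occurrences in the strand and add score × count (objective: faster; measured).

-- ===== PORT A =====
def pvSubstringsA (sequence : String) : List String :=
  (PySem.List.pyRange 0 (PySem.Str.len sequence) 1).flatMap (fun i =>
    (PySem.List.pyRange (i + 1) (PySem.Str.len sequence + 1) 1).map (fun j =>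
      PySem.Str.slice sequence (some i) (some j)))

def pvScoreByGene (genes : List (String × Int)) : PySem.Dict String Int :=
  genes.foldl (fun result p => result.insert p.1 (result.getD p.1 0 + p.2)) PySem.Dict.empty

def pvPrepareLookupTables (scored_genes : List (String × Int)) (strands : List (Int × Int × String)) :
    PySem.Dict (Int × Int) (PySem.Dict String Int) :=
  strands.foldl (fun table p =>
    if table.contains (p.1, p.2.1) then table
    else table.insert (p.1, p.2.1)
      (pvScoreByGene (PySem.List.slice scored_genes (some p.1) (some (p.2.1 + 1))))) PySem.Dict.empty

def min_and_max_scores (scored_genes : List (String × Int)) (strands : List (Int × Int × String)) : Option Int × Option Int :=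
  let tables := pvPrepareLookupTables scored_genes strands
  strands.foldl (fun mm p =>
    -- tables[first, last]: the key is always present (built from these same strands), so getD's default is never used
    let table := (tables.get? (p.1, p.2.1)).getD PySem.Dict.empty
    let score := ((pvSubstringsA p.2.2).map (fun s => table.getD s 0)).sum
    (match mm.1 with | none => some score | some m => if score < m then some score else some m,
     match mm.2 with | none => some score | some m => if m < score then some score else some m)) (none, none)

-- ===== PORT B =====
-- number of (overlapping) occurrence positions of gene in strand
def pvOccurrences (strand gene : String) : Nat :=
  (PySem.List.pyRange 0 (PySem.Str.len strand - PySem.Str.len gene + 1) 1).countP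
    (fun i => PySem.Str.slice strand (some i) (some (i + PySem.Str.len gene)) == gene)

def min_and_max_scores_alt (scored_genes : List (String × Int)) (strands : List (Int × Int × String)) : Option Int × Option Int :=
  strands.foldl (fun mm p =>
    let score := (PySem.List.slice scored_genes (some p.1) (some (p.2.1 + 1))).foldl
      (fun acc q => if PySem.Str.len q.1 == 0 then acc
                    else acc + q.2 * (pvOccurrences p.2.2 q.1 : Int)) 0
    (match mm.1 with | none => some score | some m => if score < m then some score else some m,
     match mm.2 with | none => some score | some m => if m < score then some score else some m)) (none, none)

-- ===== PRECONDITION & SPEC =====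
def Spec_min_and_max_scores (scored_genes : List (String × Int)) (strands : List (Int × Int × String)) (out : Option Int × Option Int) : Prop := out = min_and_max_scores_alt scored_genes strands
instance (scored_genes : List (String × Int)) (strands : List (Int × Int × String)) (out : Option Int × Option Int) : Decidable (Spec_min_and_max_scores scored_genes strands out) := by unfold Spec_min_and_max_scores; infer_instance

-- ===== CLAIM (what is proved, stated in full; the proofs are below) =====
def Claim_equal_min_and_max_scores : Prop := ∀ (scored_genes : List (String × Int)) (strands : List (Int × Int × String)), Dom_min_and_max_scores scored_genes strands → Spec_min_and_max_scores scored_genes strands (min_and_max_scores scored_genes strands)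

-- ===== LEMMAS AND PROOFS =====

theorem pv_tables_get (F : Int × Int → PySem.Dict String Int) (xs : List (Int × Int × String))
    (t0 : PySem.Dict (Int × Int) (PySem.Dict String Int)) (key : Int × Int)
    (h0 : ∀ v, t0.get? key = some v → v = F key)
    (hmem : (∃ p ∈ xs, (p.1, p.2.1) = key) ∨ t0.get? key = some (F key)) :
    (xs.foldl (fun t p => if t.contains (p.1, p.2.1) then t
        else t.insert (p.1, p.2.1) (F (p.1, p.2.1))) t0).get? key = some (F key) := by
  induction xs generalizing t0 with
  | nil =>
    simp only [List.foldl_nil]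
    rcases hmem with ⟨p, hp, _⟩ | h
    · simp at hp
    · exact h
  | cons x xs ih =>
    simp only [List.foldl_cons]
    by_cases hc : t0.contains (x.1, x.2.1) = true
    · rw [if_pos hc]
      apply ih t0 h0
      rcases hmem with ⟨p, hp, hpk⟩ | h
      · rcases List.mem_cons.mp hp with rfl | hpxs
        · right
          rw [hpk] at hc
          have hs : (t0.get? key).isSome := by rw [← PySem.Dict.contains_eq_isSome_get?]; exact hc
          obtain ⟨v, hv⟩ := Option.isSome_iff_exists.mp hs
          rw [hv, h0 v hv]
        · left; exact ⟨p, hpxs, hpk⟩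
      · right; exact h
    · rw [if_neg hc]
      apply ih
      · intro v hv
        rw [PySem.Dict.get?_insert] at hv
        split at hv
        · rename_i heq; cases hv; rw [heq]
        · exact h0 v hv
      · rcases hmem with ⟨p, hp, hpk⟩ | h
        · rcases List.mem_cons.mp hp with rfl | hpxs
          · right; rw [PySem.Dict.get?_insert, hpk]; simp
          · left; exact ⟨p, hpxs, hpk⟩
        · right
          rw [PySem.Dict.get?_insert]
          split
          · rename_i heq; rw [heq]
          · exact h

theorem pv_insert_sum (subs : List String) (d : PySem.Dict String Int) (g : String) (w : Int) (sc : Int) :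
    ((subs.map (fun s => ((d.insert g (w + sc)).getD s 0))).sum : Int)
    = (subs.map (fun s => d.getD s 0)).sum
      + ((subs.count g : Int) * (w + sc) - (subs.count g : Int) * d.getD g 0) := by
  induction subs with
  | nil => simp
  | cons s subs ih =>
    simp only [List.map_cons, List.sum_cons, List.count_cons]
    rw [PySem.Dict.getD_insert, ih]
    by_cases h : s = g
    · subst h; simp; ring
    · have : (s == g) = false := by simp [h]
      simp [h, this]; ring

theorem pv_dict_sum (subs : List String) (gs : List (String × Int)) (d : PySem.Dict String Int) :
    ((subs.map (fun s => ((gs.foldl (fun r p => r.insert p.1 (r.getD p.1 0 + p.2)) d).getD s 0))).sum : Int)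
    = (subs.map (fun s => d.getD s 0)).sum + (gs.map (fun p => p.2 * (subs.count p.1 : Int))).sum := by
  induction gs generalizing d with
  | nil => simp
  | cons q gs ih =>
    simp only [List.foldl_cons, List.map_cons, List.sum_cons]
    rw [ih]
    rw [pv_insert_sum subs d q.1 (d.getD q.1 0) q.2]
    ring


theorem pv_inner (strand g : String) (i : Int) (h0 : 0 ≤ i)
    (hiL : i < (strand.toList.length : Int)) :
    ((PySem.List.pyRange (i + 1) ((strand.toList.length : Int) + 1)).map
        (fun j => PySem.Str.slice strand (some i) (some j))).count g
    = if (1 ≤ g.toList.length ∧ i + (g.toList.length : Int) ≤ (strand.toList.length : Int) ∧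
          PySem.List.slice strand.toList (some i) (some (i + (g.toList.length : Int))) = g.toList)
      then 1 else 0 := by
  set L : Int := (strand.toList.length : Int) with hL
  set n : Nat := g.toList.length with hn
  have key : ∀ j ∈ PySem.List.pyRange (i + 1) (L + 1),
      ((PySem.Str.slice strand (some i) (some j) == g) = true ↔
       (j = i + (n : Int) ∧ (1 ≤ n ∧ i + (n : Int) ≤ L ∧
        PySem.List.slice strand.toList (some i) (some (i + (n : Int))) = g.toList))) := by
    intro j hj
    obtain ⟨hj1, hj2⟩ := PySem.List.mem_pyRange_one.mp hj
    constructor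
    · intro hbeq
      have heq : PySem.Str.slice strand (some i) (some j) = g := by
        exact beq_iff_eq.mp hbeq
      have htl : PySem.List.slice strand.toList (some i) (some j) = g.toList := by
        rw [← PySem.Chars.slice_eq_listSlice, ← PySem.Str.toList_slice, heq]
      have hlen : (PySem.List.slice strand.toList (some i) (some j)).length = n := by
        rw [htl]
      rw [PySem.List.slice_toNat strand.toList h0 (by omega)] at hlen htl
      simp only [List.length_take, List.length_drop] at hlen
      have hjn : j = i + (n : Int) := by omega
      have h1n : 1 ≤ n := by omega
      have hinL : i + (n : Int) ≤ L := by omega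
      refine ⟨hjn, h1n, hinL, ?_⟩
      rw [PySem.List.slice_toNat strand.toList h0 (by omega)]
      rw [← htl]
      congr 1
      omega
    · rintro ⟨hjn, h1n, hinL, hsl⟩
      have : PySem.Str.slice strand (some i) (some j) = g := by
        rw [← String.toList_inj, PySem.Str.toList_slice, PySem.Chars.slice_eq_listSlice, hjn, hsl]
      exact beq_iff_eq.mpr this
  by_cases hc : (1 ≤ n ∧ i + (n : Int) ≤ L ∧
      PySem.List.slice strand.toList (some i) (some (i + (n : Int))) = g.toList)
  · rw [if_pos hc]
    rw [List.count_eq_countP, List.countP_map]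
    have : List.countP ((fun x => x == g) ∘ fun j => PySem.Str.slice strand (some i) (some j))
        (PySem.List.pyRange (i + 1) (L + 1))
        = List.countP (fun j => j == i + (n : Int)) (PySem.List.pyRange (i + 1) (L + 1)) := by
      apply List.countP_congr
      intro j hj
      simp only [Function.comp_apply]
      rw [key j hj, beq_iff_eq]
      constructor
      · rintro ⟨h, _⟩; exact h
      · intro h; exact ⟨h, hc⟩
    rw [this, ← List.count_eq_countP]
    apply List.count_eq_one_of_mem (PySem.List.nodup_pyRange_one _ _)
    apply PySem.List.mem_pyRange_one.mpr
    omega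
  · rw [if_neg hc]
    rw [List.count_eq_countP, List.countP_map]
    apply List.countP_eq_zero.mpr
    intro j hj hp
    simp only [Function.comp_apply] at hp
    exact hc ((key j hj).mp hp).2

theorem pv_sum_ite (l : List Int) (p : Int → Prop) [DecidablePred p] :
    (l.map (fun i => if p i then (1 : Nat) else 0)).sum = l.countP (fun i => decide (p i)) := by
  induction l with
  | nil => simp
  | cons x l ih => by_cases hp : p x <;> simp [hp, ih, Nat.add_comm]


theorem pv_count_substrings (strand g : String) :
    (pvSubstringsA strand).count g
    = if g.toList.length = 0 then 0 else pvOccurrences strand g := by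
  unfold pvSubstringsA pvOccurrences
  simp only [PySem.Str.len_eq]
  set L : Int := (strand.toList.length : Int) with hL
  set n : Nat := g.toList.length with hn
  rw [List.count_flatMap]
  have h1 : (PySem.List.pyRange 0 L).map
        (List.count g ∘ fun i => (PySem.List.pyRange (i + 1) (L + 1)).map
          (fun j => PySem.Str.slice strand (some i) (some j)))
      = (PySem.List.pyRange 0 L).map (fun i =>
          if (1 ≤ n ∧ i + (n : Int) ≤ L ∧
              PySem.List.slice strand.toList (some i) (some (i + (n : Int))) = g.toList)
          then 1 else 0) := by
    apply List.map_congr_left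
    intro i hi
    obtain ⟨hi0, hiL⟩ := PySem.List.mem_pyRange_one.mp hi
    exact pv_inner strand g i hi0 hiL
  rw [h1, pv_sum_ite]
  by_cases hn0 : n = 0
  · rw [if_pos hn0]
    apply List.countP_eq_zero.mpr
    intro i _ hp
    rw [decide_eq_true_iff] at hp
    omega
  · rw [if_neg hn0]
    by_cases hnL : (n : Int) > L
    · have hB : PySem.List.pyRange 0 (L - (n : Int) + 1) = [] :=
        PySem.List.pyRange_one_eq_nil (by omega)
      rw [hB]
      simp only [List.countP_nil]
      apply List.countP_eq_zero.mpr
      intro i hi hp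
      obtain ⟨hi0, hiL⟩ := PySem.List.mem_pyRange_one.mp hi
      rw [decide_eq_true_iff] at hp
      omega
    · rw [PySem.List.pyRange_one_append 0 (L - (n : Int) + 1) L (by omega) (by omega),
          List.countP_append]
      have h2 : List.countP (fun i => decide (1 ≤ n ∧ i + (n : Int) ≤ L ∧
          PySem.List.slice strand.toList (some i) (some (i + (n : Int))) = g.toList))
          (PySem.List.pyRange (L - (n : Int) + 1) L) = 0 := by
        apply List.countP_eq_zero.mpr
        intro i hi hp
        obtain ⟨hi0, hiL⟩ := PySem.List.mem_pyRange_one.mp hi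
        rw [decide_eq_true_iff] at hp
        omega
      rw [h2, Nat.add_zero]
      apply List.countP_congr
      intro i hi
      obtain ⟨hi0, hiL⟩ := PySem.List.mem_pyRange_one.mp hi
      simp only [decide_eq_true_iff, beq_iff_eq]
      constructor
      · rintro ⟨-, -, hsl⟩
        rw [← String.toList_inj, PySem.Str.toList_slice, PySem.Chars.slice_eq_listSlice]
        exact hsl
      · intro hstr
        refine ⟨by omega, by omega, ?_⟩
        rw [← PySem.Chars.slice_eq_listSlice, ← PySem.Str.toList_slice, hstr]

-- ===== VERDICT (by name: the statement is the Claim_ definition above) =====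
theorem min_and_max_scores_spec : Claim_equal_min_and_max_scores := by
  intro sg st _
  unfold Spec_min_and_max_scores
  simp only [min_and_max_scores, min_and_max_scores_alt]
  apply PySem.List.foldl_congr_mem
  intro acc p hp
  have htbl : (pvPrepareLookupTables sg st).get? (p.1, p.2.1)
      = some (pvScoreByGene (PySem.List.slice sg (some p.1) (some (p.2.1 + 1)))) := by
    apply pv_tables_get (fun k => pvScoreByGene (PySem.List.slice sg (some k.1) (some (k.2 + 1))))
    · intro v hv
      rw [PySem.Dict.get?_empty] at hv
      cases hv
    · exact Or.inl ⟨p, hp, rfl⟩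
  have hscore : ((pvSubstringsA p.2.2).map (fun s =>
        ((((pvPrepareLookupTables sg st).get? (p.1, p.2.1)).getD PySem.Dict.empty).getD s 0))).sum
      = (PySem.List.slice sg (some p.1) (some (p.2.1 + 1))).foldl
          (fun acc q => if PySem.Str.len q.1 == 0 then acc
                        else acc + q.2 * (pvOccurrences p.2.2 q.1 : Int)) 0 := by
    rw [htbl, Option.getD_some]
    unfold pvScoreByGene
    rw [pv_dict_sum]
    have hz : ((pvSubstringsA p.2.2).map (fun s => PySem.Dict.empty.getD s 0)).sum = (0 : Int) := by
      simp [PySem.Dict.getD_empty]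
    rw [hz, zero_add]
    rw [PySem.List.foldl_congr_mem _ _
        (fun acc q => acc + (if PySem.Str.len q.1 == 0 then 0
            else q.2 * (pvOccurrences p.2.2 q.1 : Int))) 0 ?_]
    · rw [PySem.List.foldl_add, zero_add]
      apply congrArg
      apply List.map_congr_left
      intro q _
      rw [pv_count_substrings]
      by_cases hq : q.1.toList.length = 0
      · rw [if_pos hq]
        have : (PySem.Str.len q.1 == 0) = true := by
          simp [PySem.Str.len_eq, hq]
        rw [if_pos this]
        simp
      · rw [if_neg hq]
        have hf : (PySem.Str.len q.1 == 0) = false := by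
          simp [PySem.Str.len_eq]
          exact fun h => absurd (by rw [h]; rfl) hq
        rw [hf]
        simp
    · intro a q _
      by_cases hq : q.1 = "" <;> simp [hq]
  rw [hscore]
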